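-- pv_equiv track=rewrite | github.com/Edu92337/CodeForces | 155A.py | vitorias
-- ===== SOURCE A (Python) =====
-- def vitorias(n,array):
--     array = [int(c) for c in array]
--     n = int(n)
--     menor = array[0]
--     maior = array[0]
--     pontos = 0
--     for i in range(1,len(array)):
--         if array[i] > maior :
--             maior = array[i]
--             pontos += 1
--         if array[i] < menor :
--             menor = array[i]
--             pontos += 1
--     return pontos
-- ===== SOURCE B (Python) =====
-- def vitorias(n, array):
--     array = [int(c) for c in array]
--     n = int(n)
--     return sum(
--         1
--         for i in range(1, len(array))
--         if array[i] > max(array[:i]) or array[i] < min(array[:i])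
--     )
-- ===== Notes on version B (the rewrite author's own statement) =====
-- stated objective: alternative
-- what changed: Replaces the stateful single loop carrying running max/min/score with a stateless count of indices i whose element exceeds max(array[:i]) or undercuts min(array[:i]); no accumulator variables survive between iterations.
import Mathlib
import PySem

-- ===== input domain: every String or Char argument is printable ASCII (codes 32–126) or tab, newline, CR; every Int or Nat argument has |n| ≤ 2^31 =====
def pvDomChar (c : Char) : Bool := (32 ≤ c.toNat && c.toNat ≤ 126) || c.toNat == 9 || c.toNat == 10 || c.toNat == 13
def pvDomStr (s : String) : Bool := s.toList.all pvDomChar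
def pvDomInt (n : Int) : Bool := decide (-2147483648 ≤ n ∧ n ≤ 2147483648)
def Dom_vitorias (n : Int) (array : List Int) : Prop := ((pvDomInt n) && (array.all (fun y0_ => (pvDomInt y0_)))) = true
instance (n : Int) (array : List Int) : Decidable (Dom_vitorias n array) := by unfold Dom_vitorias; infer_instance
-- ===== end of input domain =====

-- B replaces A's stateful running-max/min loop by a stateless count over prefix extrema (objective: alternative, not faster).

-- ===== PORT A =====
-- loop body of A: the two if-updates on (menor, maior, pontos) at index i
def vitStep (array : List Int) (st : Int × Int × Int) (i : Int) : Int × Int × Int :=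
  let menor := st.1
  let maior := st.2.1
  let pontos := st.2.2
  let x := PySem.List.pyGetD array i 0   -- i ∈ range(1, len): in range, pyGetD totalizes array[i]
  let maior' := if x > maior then x else maior
  let pontos' := if x > maior then pontos + 1 else pontos
  let menor' := if x < menor then x else menor
  let pontos'' := if x < menor then pontos' + 1 else pontos'
  (menor', maior', pontos'')

def vitorias (n : Int) (array : List Int) : Int :=
  match array with
  | [] => 0   -- Python raises IndexError at array[0]; excluded by Pre_
  | a0 :: _ =>
    ((PySem.List.pyRange 1 (array.length : Int) 1).foldl (vitStep array) (a0, a0, 0)).2.2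

-- ===== PORT B =====
-- term of B's generator at index i: 1 if array[i] beats max(array[:i]) or min(array[:i]), else 0
-- (i ≥ 1, so the slice is nonempty and .getD 0 never supplies its default; pyGetD likewise in range)
def altTerm (array : List Int) (i : Int) : Int :=
  if PySem.List.pyGetD array i 0 >
       (PySem.List.max? (PySem.List.slice array (some 0) (some i)) (fun y => y)).getD 0
     ∨ PySem.List.pyGetD array i 0 <
       (PySem.List.min? (PySem.List.slice array (some 0) (some i)) (fun y => y)).getD 0
  then 1 else 0

def vitorias_alt (n : Int) (array : List Int) : Int :=
  ((PySem.List.pyRange 1 (array.length : Int) 1).map (altTerm array)).sum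

-- ===== PRECONDITION & SPEC =====
-- Pre_ excludes only the empty array, on which Python A raises IndexError at array[0].
def Pre_vitorias (n : Int) (array : List Int) : Prop := array ≠ []
instance (n : Int) (array : List Int) : Decidable (Pre_vitorias n array) := by unfold Pre_vitorias; infer_instance
def pvWitness_vitorias : Int × List Int := (4, [1, 3, 2, 0, 5])

def Spec_vitorias (n : Int) (array : List Int) (out : Int) : Prop := out = vitorias_alt n array
instance (n : Int) (array : List Int) (out : Int) : Decidable (Spec_vitorias n array out) := by unfold Spec_vitorias; infer_instance

-- ===== CLAIM (what is proved, stated in full; the proofs are below) =====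
def Claim_equal_vitorias : Prop := ∀ (n : Int) (array : List Int), Dom_vitorias n array → Pre_vitorias n array → Spec_vitorias n array (vitorias n array)

-- ===== LEMMAS AND PROOFS =====

-- loop invariant: after the first k steps A's state is (prefix min, prefix max, B's partial sum)
lemma vit_loop_inv (a0 : Int) (t : List Int) (k : Nat) (hk : k ≤ t.length) :
    (PySem.List.pyRange 1 (1 + (k : Int)) 1).foldl (vitStep (a0 :: t)) (a0, a0, 0)
      = ((t.take k).foldl min a0, (t.take k).foldl max a0,
         ((PySem.List.pyRange 1 (1 + (k : Int)) 1).map (altTerm (a0 :: t))).sum) := by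
  induction k with
  | zero =>
    rw [show ((1 : Int) + (0 : Nat) = 1) by norm_num,
        PySem.List.pyRange_one_eq_nil (le_refl (1 : Int))]
    simp
  | succ k ih =>
    have hk' : k ≤ t.length := Nat.le_of_succ_le hk
    have hkl : k < t.length := hk
    have hcast : (1 : Int) + ((k + 1 : Nat) : Int) = (1 + (k : Int)) + 1 := by push_cast; ring
    rw [hcast, PySem.List.pyRange_one_succ_right (by omega),
        List.foldl_append, List.map_append, List.sum_append, ih hk']
    -- the element read at index 1 + k is t[k]
    have hx : PySem.List.pyGetD (a0 :: t) (1 + (k : Int)) 0 = t[k] := by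
      rw [show (1 : Int) + (k : Int) = ((k + 1 : Nat) : Int) by push_cast; ring,
          PySem.List.pyGetD_natCast]
      simp [List.getD_eq_getElem?_getD, List.getElem?_eq_getElem hkl]
    -- the slice array[:1+k] is a0 :: t.take k
    have hsl : PySem.List.slice (a0 :: t) (some 0) (some (1 + (k : Int)))
        = a0 :: t.take k := by
      rw [PySem.List.slice_zero_start, PySem.List.slice_to _ (by omega)]
      simp [show ((1 : Int) + (k : Int)).toNat = k + 1 by omega]
    have hmle : (t.take k).foldl min a0 ≤ (t.take k).foldl max a0 :=
      le_trans (PySem.List.foldl_min_le (t.take k) a0).1 (PySem.List.le_foldl_max (t.take k) a0).1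
    have htk : t.take (k + 1) = t.take k ++ [t[k]] := by
      rw [List.take_add_one]; simp [List.getElem?_eq_getElem hkl]
    set m := (t.take k).foldl min a0 with hm
    set M := (t.take k).foldl max a0 with hM
    set x := t[k] with hxk
    simp only [List.foldl_cons, List.foldl_nil, List.map_cons, List.map_nil, List.sum_cons,
      List.sum_nil, htk, List.foldl_append]
    have hstep : vitStep (a0 :: t) (m, M, ((PySem.List.pyRange 1 (1 + (k:Int)) 1).map (altTerm (a0 :: t))).sum) (1 + (k : Int))
        = (min m x, max M x,
           ((PySem.List.pyRange 1 (1 + (k:Int)) 1).map (altTerm (a0 :: t))).sum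
             + altTerm (a0 :: t) (1 + (k : Int))) := by
      have halt : altTerm (a0 :: t) (1 + (k : Int)) = if x > M ∨ x < m then 1 else 0 := by
        unfold altTerm
        rw [hx, hsl]
        rw [PySem.List.max?_id_cons, PySem.List.min?_id_cons]
        simp [← hm, ← hM]
      unfold vitStep
      rw [hx, halt]
      by_cases h1 : x > M <;> by_cases h2 : x < m <;>
        simp [h1, h2, min_def, max_def] <;> omega
    rw [hstep]
    refine Prod.ext (by rw [hm]) (Prod.ext (by rw [hM]) ?_)
    simp [add_comm]

-- ===== VERDICT (by name: the statement is the Claim_ definition above) =====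
theorem vitorias_spec : Claim_equal_vitorias := by
  intro n array _ hpre
  unfold Spec_vitorias
  match array with
  | [] => exact absurd rfl hpre
  | a0 :: t =>
    have hlen : (((a0 :: t).length : Nat) : Int) = 1 + (t.length : Int) := by
      simp; omega
    show ((PySem.List.pyRange 1 (((a0 :: t).length : Nat) : Int) 1).foldl
            (vitStep (a0 :: t)) (a0, a0, 0)).2.2
        = ((PySem.List.pyRange 1 (((a0 :: t).length : Nat) : Int) 1).map (altTerm (a0 :: t))).sum
    rw [hlen, vit_loop_inv a0 t t.length (le_refl _)]
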